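-- pv_equiv track=rewrite | github.com/MrBrantCode/unitest_baseline | mut_generate/mist_train_taco/taco_9406/solution.py | find_min_max_numbers
-- ===== SOURCE A (Python) =====
-- def find_min_max_numbers(m: int, s: int) -> tuple:
--     if s > 9 * m:
--         return ("-1", "-1")
--     elif s == 0:
--         if m == 1:
--             return ("0", "0")
--         else:
--             return ("-1", "-1")
--     else:
--         # Find the smallest number
--         min_number = [0] * (m - 1)
--         min_number = [1] + min_number
--         curr = m - 1
--         for _ in range(s - 1):
--             min_number[curr] += 1
--             if min_number[curr] == 9:
--                 curr -= 1
--         min_number_str = ''.join(map(str, min_number))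
--
--         # Find the largest number
--         max_number = [0] * m
--         curr = 0
--         for _ in range(s):
--             max_number[curr] += 1
--             if max_number[curr] == 9:
--                 curr += 1
--         max_number_str = ''.join(map(str, max_number))
--
--         return (min_number_str, max_number_str)
-- ===== SOURCE B (Python) =====
-- def find_min_max_numbers(m: int, s: int) -> tuple:
--     if s > 9 * m:
--         return ("-1", "-1")
--     elif s == 0:
--         if m == 1:
--             return ("0", "0")
--         else:
--             return ("-1", "-1")
--     else:
--         # Largest: as many 9s as possible up front, then the remainder, then zeros.
--         q, r = divmod(s, 9)
--         max_str = "9" * q + (str(r) if r else "") + "0" * (m - q - (1 if r else 0))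
--         # Smallest: minimal leading digit, zeros, remainder digit, 9s at the end.
--         lead = max(1, s - 9 * (m - 1))
--         q2, r2 = divmod(s - lead, 9)
--         min_str = (str(lead) + "0" * (m - 1 - q2 - (1 if r2 else 0))
--                    + (str(r2) if r2 else "") + "9" * q2)
--         return (min_str, max_str)
-- ===== Notes on version B (the rewrite author's own statement) =====
-- stated objective: faster
-- what changed: A builds each answer by incrementing one digit per unit of digit sum (s loop iterations per number); B computes both digit strings in closed form with divmod(s, 9) and string repetition, no per-unit loop.
-- outside the precondition, e.g. on find_min_max_numbers(2, -3): A returns ('10', '00'), B returns ('105', '600')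
import Mathlib
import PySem

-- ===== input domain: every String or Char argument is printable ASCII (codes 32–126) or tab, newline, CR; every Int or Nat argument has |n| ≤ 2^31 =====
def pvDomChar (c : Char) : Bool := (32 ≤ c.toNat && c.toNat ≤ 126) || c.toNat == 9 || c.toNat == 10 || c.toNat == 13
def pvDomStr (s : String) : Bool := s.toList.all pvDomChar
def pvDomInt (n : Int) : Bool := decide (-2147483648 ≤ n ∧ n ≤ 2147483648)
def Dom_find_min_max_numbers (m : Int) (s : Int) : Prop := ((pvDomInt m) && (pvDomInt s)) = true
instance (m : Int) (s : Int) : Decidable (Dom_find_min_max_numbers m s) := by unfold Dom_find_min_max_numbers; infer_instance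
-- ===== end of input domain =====

-- B replaces A's two digit-by-digit increment loops (one step per unit of digit sum) with
-- closed-form divmod arithmetic that writes both digit strings directly (objective: faster).

-- ===== PORT A =====

-- ''.join(map(str, xs))
def pvDigits (xs : List Int) : String := PySem.Str.join "" (xs.map PySem.Int.toStr)

-- one iteration of A's min loop body: min_number[curr] += 1; if min_number[curr] == 9: curr -= 1
-- (pyGetD/pySetD are total forms; on every admitted input curr stays a valid Python index)
def pvMinStep (st : List Int × Int) : List Int × Int :=
  let v := PySem.List.pyGetD st.1 st.2 0 + 1
  (PySem.List.pySetD st.1 st.2 v, if v = 9 then st.2 - 1 else st.2)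

-- one iteration of A's max loop body: max_number[curr] += 1; if max_number[curr] == 9: curr += 1
def pvMaxStep (st : List Int × Int) : List Int × Int :=
  let v := PySem.List.pyGetD st.1 st.2 0 + 1
  (PySem.List.pySetD st.1 st.2 v, if v = 9 then st.2 + 1 else st.2)

def find_min_max_numbers (m : Int) (s : Int) : String × String :=
  if s > 9 * m then ("-1", "-1")
  else if s = 0 then
    if m = 1 then ("0", "0") else ("-1", "-1")
  else
    -- min_number = [1] + [0]*(m-1); curr = m-1; for _ in range(s-1): …
    let st1 := pvMinStep^[(s - 1).toNat] (1 :: List.replicate (m - 1).toNat 0, m - 1)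
    -- max_number = [0]*m; curr = 0; for _ in range(s): …
    let st2 := pvMaxStep^[s.toNat] (List.replicate m.toNat 0, 0)
    (pvDigits st1.1, pvDigits st2.1)

-- ===== PORT B =====

-- "c" * n  (Python string repetition; empty for n ≤ 0)
def pvRepeatChar (c : Char) (n : Int) : String := String.ofList (PySem.List.pyRepeat [c] n)

def find_min_max_numbers_alt (m : Int) (s : Int) : String × String :=
  if s > 9 * m then ("-1", "-1")
  else if s = 0 then
    if m = 1 then ("0", "0") else ("-1", "-1")
  else
    let q := PySem.Int.floordiv s 9
    let r := PySem.Int.mod s 9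
    let maxStr := pvRepeatChar '9' q ++ (if r ≠ 0 then PySem.Int.toStr r else "")
                    ++ pvRepeatChar '0' (m - q - (if r ≠ 0 then 1 else 0))
    let lead := max 1 (s - 9 * (m - 1))
    let q2 := PySem.Int.floordiv (s - lead) 9
    let r2 := PySem.Int.mod (s - lead) 9
    let minStr := PySem.Int.toStr lead
                    ++ pvRepeatChar '0' (m - 1 - q2 - (if r2 ≠ 0 then 1 else 0))
                    ++ (if r2 ≠ 0 then PySem.Int.toStr r2 else "")
                    ++ pvRepeatChar '9' q2
    (minStr, maxStr)

-- ===== PRECONDITION & SPEC =====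
-- Pre_ excludes negative digit sums s < 0 (outside the task's natural domain) except where the
-- "-1" guard still fires: on the excluded inputs A's range-loops run zero times and it returns
-- leftover initializer padding such as ("10", "00").
def Pre_find_min_max_numbers (m : Int) (s : Int) : Prop := 0 ≤ s ∨ 9 * m < s
instance (m : Int) (s : Int) : Decidable (Pre_find_min_max_numbers m s) := by unfold Pre_find_min_max_numbers; infer_instance
def pvWitness_find_min_max_numbers : Int × Int := (2, 3)

def Spec_find_min_max_numbers (m : Int) (s : Int) (out : String × String) : Prop := out = find_min_max_numbers_alt m s
instance (m : Int) (s : Int) (out : String × String) : Decidable (Spec_find_min_max_numbers m s out) := by unfold Spec_find_min_max_numbers; infer_instance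

-- ===== CLAIM (what is proved, stated in full; the proofs are below) =====
def Claim_equal_find_min_max_numbers : Prop := ∀ (m : Int) (s : Int), Dom_find_min_max_numbers m s → Pre_find_min_max_numbers m s → Spec_find_min_max_numbers m s (find_min_max_numbers m s)

-- ===== LEMMAS AND PROOFS =====

-- the state of A's max loop after k = 9*q + r steps: q nines, then the digit r, then zeros
def pvMaxList (M q r : Nat) : List Int :=
  List.replicate q 9 ++ (if q < M then (r : Int) :: List.replicate (M - q - 1) 0 else [])

-- the state of A's min loop after k = 9*j + t steps
def pvMinList (M j t : Nat) : List Int :=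
  if j + 1 < M then 1 :: (List.replicate (M - 2 - j) 0 ++ (t : Int) :: List.replicate j 9)
  else ((1 + t : Nat) : Int) :: List.replicate (M - 1) 9

def pvMinCurr (M j t : Nat) : Int :=
  if j + 1 < M then (M : Int) - 1 - j else (if t = 8 then -1 else 0)

theorem pvGetD_rep_append (a d : Int) (q : Nat) (ys : List Int) :
    (List.replicate q a ++ ys).getD q d = ys.getD 0 d := by
  induction q with
  | zero => simp
  | succ n ih => simpa [List.replicate_succ] using ih

theorem pvSet_rep_append (a v : Int) (q : Nat) (ys : List Int) :
    (List.replicate q a ++ ys).set q v = List.replicate q a ++ ys.set 0 v := by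
  induction q with
  | zero => simp
  | succ n ih => simp [List.replicate_succ, ih]

theorem pvJoin_digits_toList (xs : List Int) :
    (pvDigits xs).toList = (xs.map PySem.Int.toChars).flatten := by
  unfold pvDigits
  rw [PySem.Str.toList_join]
  have hsep : ("" : String).toList = [] := rfl
  rw [hsep]
  have : ∀ l : List (List Char), PySem.Chars.join [] l = l.flatten := by
    intro l
    induction l with
    | nil => simp [PySem.Chars.join_nil]
    | cons x t ih =>
      cases t with
      | nil => simp [PySem.Chars.join_singleton]
      | cons y u => simp [PySem.Chars.join_cons_cons] at *; simp [ih]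
  rw [this]
  simp only [List.map_map]
  congr 1
  exact List.map_congr_left (fun x _ => by simp [Function.comp, PySem.Int.toList_toStr])

theorem pvFlatten_rep_singleton {α : Type} (a : α) (n : Nat) :
    (List.replicate n [a]).flatten = List.replicate n a := by
  induction n with
  | zero => rfl
  | succ k ih => simp [List.replicate_succ, ih]

theorem pvMax_inv (M : Nat) (hM : 1 ≤ M) (k : Nat) (hk : k ≤ 9 * M) :
    pvMaxStep^[k] (List.replicate M (0 : Int), 0) = (pvMaxList M (k / 9) (k % 9), ((k / 9 : Nat) : Int)) := by
  induction k with
  | zero =>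
    simp [pvMaxList]
    cases M with
    | zero => omega
    | succ n => simp [List.replicate_succ]
  | succ k ih =>
    have hk' : k ≤ 9 * M := by omega
    rw [Function.iterate_succ_apply', ih hk']
    have hq : k / 9 < M := by omega
    have hr : k % 9 < 9 := by omega
    set q := k / 9 with hqdef
    set r := k % 9 with hrdef
    -- evaluate the step
    have hget : PySem.List.pyGetD (pvMaxList M q r) ((q : Nat) : Int) 0 = (r : Int) := by
      rw [PySem.List.pyGetD_natCast]
      unfold pvMaxList
      rw [if_pos hq, pvGetD_rep_append]
      simp
    have hset : PySem.List.pySetD (pvMaxList M q r) ((q : Nat) : Int) ((r : Int) + 1)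
        = List.replicate q 9 ++ ((r : Int) + 1) :: List.replicate (M - q - 1) 0 := by
      rw [PySem.List.pySetD_natCast]
      unfold pvMaxList
      rw [if_pos hq, pvSet_rep_append]
      simp
    show (PySem.List.pySetD (pvMaxList M q r) _ _, _) = _
    rw [hget, hset]
    by_cases h8 : r = 8
    · have h9 : ((r : Nat) : Int) + 1 = 9 := by omega
      rw [if_pos h9]
      have hq1 : (k+1) / 9 = q + 1 := by omega
      have hr1 : (k+1) % 9 = 0 := by omega
      rw [hq1, hr1, Prod.mk.injEq]
      refine ⟨?_, by push_cast; ring⟩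
      rw [h9]
      unfold pvMaxList
      by_cases hq2 : q + 1 < M
      · rw [if_pos hq2]
        have hmq : M - q - 1 = (M - (q+1) - 1) + 1 := by omega
        rw [hmq, List.replicate_succ, List.replicate_succ']
        simp
      · rw [if_neg hq2]
        have : M - q - 1 = 0 := by omega
        rw [this, List.replicate_succ']
        simp
    · have h9 : ¬ (((r : Nat) : Int) + 1 = 9) := by omega
      rw [if_neg h9]
      have hq1 : (k+1) / 9 = q := by omega
      have hr1 : (k+1) % 9 = r + 1 := by omega
      rw [hq1, hr1, Prod.mk.injEq]
      refine ⟨?_, rfl⟩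
      unfold pvMaxList
      rw [if_pos hq]
      push_cast; ring_nf

theorem pvMin_inv (M : Nat) (hM : 1 ≤ M) (k : Nat) (hk : k ≤ 9 * M - 1) :
    pvMinStep^[k] (1 :: List.replicate (M - 1) (0 : Int), (M : Int) - 1)
      = (pvMinList M (k / 9) (k % 9), pvMinCurr M (k / 9) (k % 9)) := by
  induction k with
  | zero =>
    unfold pvMinList pvMinCurr
    by_cases h1 : 0 + 1 < M
    · rw [if_pos h1, if_pos h1]
      have hrep : M - 1 = (M - 2 - 0) + 1 := by omega
      simp [Function.iterate_zero_apply, hrep, List.replicate_succ']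
    · have hM1 : M = 1 := by omega
      subst hM1
      simp
  | succ k ih =>
    have hk' : k ≤ 9 * M - 1 := by omega
    rw [Function.iterate_succ_apply', ih hk']
    have hq : k / 9 ≤ M - 1 := by omega
    have hr : k % 9 < 9 := by omega
    have hkk : k = 9 * (k / 9) + k % 9 := by omega
    set q := k / 9 with hqdef
    set r := k % 9 with hrdef
    by_cases hjm : q + 1 < M
    · -- interior position: curr = M-1-q ≥ 1
      have hcurr : pvMinCurr M q r = ((M - 1 - q : Nat) : Int) := by
        unfold pvMinCurr; rw [if_pos hjm]; omega
      have hidx : M - 1 - q = (M - 2 - q) + 1 := by omega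
      have hget : PySem.List.pyGetD (pvMinList M q r) ((M - 1 - q : Nat) : Int) 0 = (r : Int) := by
        rw [PySem.List.pyGetD_natCast]
        unfold pvMinList
        rw [if_pos hjm, hidx]
        simp
      have hset : PySem.List.pySetD (pvMinList M q r) ((M - 1 - q : Nat) : Int) ((r : Int) + 1)
          = 1 :: (List.replicate (M - 2 - q) 0 ++ ((r : Int) + 1) :: List.replicate q 9) := by
        rw [PySem.List.pySetD_natCast]
        unfold pvMinList
        rw [if_pos hjm, hidx]
        simp
      show (PySem.List.pySetD _ _ _, _) = _
      rw [hcurr, hget, hset]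
      by_cases h8 : r = 8
      · have h9 : ((r : Nat) : Int) + 1 = 9 := by omega
        rw [if_pos h9]
        have hq1 : (k+1) / 9 = q + 1 := by omega
        have hr1 : (k+1) % 9 = 0 := by omega
        rw [hq1, hr1, Prod.mk.injEq]
        constructor
        · rw [h9]
          unfold pvMinList
          by_cases hq2 : q + 2 < M
          · rw [if_pos (by omega : q + 1 + 1 < M)]
            have hmq : M - 2 - q = (M - 2 - (q+1)) + 1 := by omega
            rw [hmq, List.replicate_succ', List.replicate_succ]
            simp
          · rw [if_neg (by omega : ¬ (q + 1 + 1 < M))]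
            have h0 : M - 2 - q = 0 := by omega
            have h1 : M - 1 = q + 1 := by omega
            rw [h0, h1, List.replicate_succ]
            simp
        · show (_ : Int) = _
          unfold pvMinCurr
          by_cases hq2 : q + 2 < M
          · rw [if_pos (by omega : q + 1 + 1 < M)]
            push_cast; omega
          · rw [if_neg (by omega : ¬ (q + 1 + 1 < M)), if_neg (by omega : ¬ (0 : Nat) = 8)]
            push_cast; omega
      · have h9 : ¬ (((r : Nat) : Int) + 1 = 9) := by omega
        rw [if_neg h9]
        have hq1 : (k+1) / 9 = q := by omega
        have hr1 : (k+1) % 9 = r + 1 := by omega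
        rw [hq1, hr1, Prod.mk.injEq]
        constructor
        · unfold pvMinList
          rw [if_pos hjm]
          push_cast; ring_nf
        · show (_ : Int) = _
          unfold pvMinCurr
          rw [if_pos hjm]
          push_cast; omega
    · -- at the leading digit: q = M - 1, t ≤ 7
      have hqM : q = M - 1 := by omega
      have ht7 : r ≤ 7 := by omega
      have hcurr : pvMinCurr M q r = 0 := by
        unfold pvMinCurr; rw [if_neg hjm, if_neg (by omega : ¬ r = 8)]
      have hlist : pvMinList M q r = ((1 + r : Nat) : Int) :: List.replicate (M - 1) 9 := by
        unfold pvMinList; rw [if_neg hjm]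
      have hget : PySem.List.pyGetD (pvMinList M q r) 0 0 = ((1 + r : Nat) : Int) := by
        rw [hlist]; simp [PySem.List.pyGetD_zero_cons]
      have hset : PySem.List.pySetD (pvMinList M q r) 0 (((1 + r : Nat) : Int) + 1)
          = (((1 + r : Nat) : Int) + 1) :: List.replicate (M - 1) 9 := by
        rw [hlist]
        have : (0 : Int) = ((0 : Nat) : Int) := rfl
        rw [this, PySem.List.pySetD_natCast]
        simp
      show (PySem.List.pySetD _ _ _, _) = _
      rw [hcurr, hget, hset]
      have hq1 : (k+1) / 9 = q := by omega
      have hr1 : (k+1) % 9 = r + 1 := by omega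
      rw [hq1, hr1, Prod.mk.injEq]
      constructor
      · unfold pvMinList
        rw [if_neg hjm]
        push_cast; ring_nf
      · show (_ : Int) = _
        unfold pvMinCurr
        rw [if_neg hjm]
        by_cases h7 : r = 7
        · rw [if_pos (by omega : r + 1 = 8), if_pos (by omega : ((1 + r : Nat) : Int) + 1 = 9)]
          simp
        · rw [if_neg (by omega : ¬ r + 1 = 8), if_neg (by omega : ¬ ((1 + r : Nat) : Int) + 1 = 9)]


theorem pvRepeatChar_toList (c : Char) (n : Int) :
    (pvRepeatChar c n).toList = List.replicate n.toNat c := by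
  simp [pvRepeatChar, PySem.List.pyRepeat_singleton]

theorem pvToChars0 : PySem.Int.toChars 0 = ['0'] := by decide
theorem pvToChars9 : PySem.Int.toChars 9 = ['9'] := by decide

theorem pvMaxEq (m s : Int) (M K : Nat) (hm : m = (M : Int)) (hs : s = (K : Int))
    (hM : 1 ≤ M) (h1 : 1 ≤ K) (h2 : K ≤ 9 * M) :
    pvDigits (pvMaxList M (K / 9) (K % 9))
      = pvRepeatChar '9' (PySem.Int.floordiv s 9)
        ++ (if PySem.Int.mod s 9 ≠ 0 then PySem.Int.toStr (PySem.Int.mod s 9) else "")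
        ++ pvRepeatChar '0' (m - PySem.Int.floordiv s 9 - (if PySem.Int.mod s 9 ≠ 0 then 1 else 0)) := by
  have hQ : PySem.Int.floordiv s 9 = ((K / 9 : Nat) : Int) := by
    rw [hs]; exact_mod_cast PySem.Int.floordiv_natCast K 9
  have hR : PySem.Int.mod s 9 = ((K % 9 : Nat) : Int) := by
    rw [hs]; exact_mod_cast PySem.Int.mod_natCast K 9
  rw [hQ, hR, hm]
  have hdiv : K = 9 * (K / 9) + K % 9 := by omega
  apply String.toList_inj.mp
  by_cases hR0 : K % 9 = 0
  · rw [hR0]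
    have hne : ¬ (((0 : Nat) : Int) ≠ 0) := by simp
    rw [if_neg hne, if_neg hne]
    by_cases hQM : K / 9 < M
    · have hz : ((M : Int) - ((K / 9 : Nat) : Int) - 0).toNat = M - K / 9 := by omega
      simp only [pvJoin_digits_toList, pvMaxList, if_pos hQM, List.map_append, List.map_replicate,
        List.flatten_append, pvFlatten_rep_singleton, List.map_cons, List.flatten_cons,
        pvToChars0, pvToChars9, String.toList_append, pvRepeatChar_toList, hz,
        String.toList_empty]
      have hrep : M - K / 9 = (M - K / 9 - 1) + 1 := by omega
      rw [hrep, List.replicate_succ]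
      simp [pvToChars0]
      omega
    · have hQM' : K / 9 = M := by omega
      have hz : ((M : Int) - ((K / 9 : Nat) : Int) - 0).toNat = 0 := by omega
      simp only [pvJoin_digits_toList, pvMaxList, if_neg hQM, List.map_append, List.map_replicate,
        List.flatten_append, pvFlatten_rep_singleton, List.map_nil, List.flatten_nil,
        pvToChars9, String.toList_append, pvRepeatChar_toList, hz,
        String.toList_empty, List.replicate_zero]
      simp
      omega
  · have hQM : K / 9 < M := by omega
    have hne : (((K % 9 : Nat) : Int) ≠ 0) := by omega
    rw [if_pos hne, if_pos hne]
    have hz : ((M : Int) - ((K / 9 : Nat) : Int) - 1).toNat = M - K / 9 - 1 := by omega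
    simp only [pvJoin_digits_toList, pvMaxList, if_pos hQM, List.map_append, List.map_replicate,
      List.flatten_append, pvFlatten_rep_singleton, List.map_cons, List.flatten_cons,
      pvToChars0, pvToChars9, String.toList_append, pvRepeatChar_toList, hz,
      PySem.Int.toList_toStr]
    simp
    omega

theorem pvToChars1 : PySem.Int.toChars 1 = ['1'] := by decide

theorem pvMinEq (m s : Int) (M K : Nat) (hm : m = (M : Int)) (hs : s = (K : Int))
    (hM : 1 ≤ M) (h1 : 1 ≤ K) (h2 : K ≤ 9 * M) :
    pvDigits (pvMinList M ((K - 1) / 9) ((K - 1) % 9))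
      = PySem.Int.toStr (max 1 (s - 9 * (m - 1)))
        ++ pvRepeatChar '0' (m - 1 - PySem.Int.floordiv (s - max 1 (s - 9 * (m - 1))) 9
              - (if PySem.Int.mod (s - max 1 (s - 9 * (m - 1))) 9 ≠ 0 then 1 else 0))
        ++ (if PySem.Int.mod (s - max 1 (s - 9 * (m - 1))) 9 ≠ 0 then
              PySem.Int.toStr (PySem.Int.mod (s - max 1 (s - 9 * (m - 1))) 9) else "")
        ++ pvRepeatChar '9' (PySem.Int.floordiv (s - max 1 (s - 9 * (m - 1))) 9) := by
  have hdiv : K - 1 = 9 * ((K - 1) / 9) + (K - 1) % 9 := by omega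
  have hrlt : (K - 1) % 9 < 9 := by omega
  set j := (K - 1) / 9 with hjdef
  set t := (K - 1) % 9 with htdef
  rw [hm, hs]
  by_cases hA : j + 1 < M
  · have hlead : max 1 ((K : Int) - 9 * ((M : Int) - 1)) = 1 := by omega
    rw [hlead]
    have hK1 : (K : Int) - 1 = ((K - 1 : Nat) : Int) := by omega
    have hq2 : PySem.Int.floordiv ((K : Int) - 1) 9 = ((j : Nat) : Int) := by
      rw [hK1]; exact_mod_cast PySem.Int.floordiv_natCast (K - 1) 9
    have hr2 : PySem.Int.mod ((K : Int) - 1) 9 = ((t : Nat) : Int) := by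
      rw [hK1]; exact_mod_cast PySem.Int.mod_natCast (K - 1) 9
    rw [hq2, hr2]
    apply String.toList_inj.mp
    by_cases ht0 : t = 0
    · rw [ht0]
      have hne : ¬ (((0 : Nat) : Int) ≠ 0) := by simp
      rw [if_neg hne, if_neg hne]
      have hz : ((M : Int) - 1 - ((j : Nat) : Int) - 0).toNat = M - 1 - j := by omega
      simp only [pvJoin_digits_toList, pvMinList, if_pos hA, List.map_append, List.map_replicate,
        List.flatten_append, pvFlatten_rep_singleton, List.map_cons, List.flatten_cons,
        pvToChars0, pvToChars9, pvToChars1, String.toList_append, pvRepeatChar_toList, hz,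
        PySem.Int.toList_toStr, String.toList_empty, Int.toNat_natCast]
      have hrep : M - 1 - j = (M - 2 - j) + 1 := by omega
      rw [hrep, List.replicate_succ']
      simp [pvToChars0]
    · have hne : (((t : Nat) : Int) ≠ 0) := by omega
      rw [if_pos hne, if_pos hne]
      have hz : ((M : Int) - 1 - ((j : Nat) : Int) - 1).toNat = M - 2 - j := by omega
      simp only [pvJoin_digits_toList, pvMinList, if_pos hA, List.map_append, List.map_replicate,
        List.flatten_append, pvFlatten_rep_singleton, List.map_cons, List.flatten_cons,
        pvToChars0, pvToChars9, pvToChars1, String.toList_append, pvRepeatChar_toList, hz,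
        PySem.Int.toList_toStr, Int.toNat_natCast]
      simp
  · have hj : j = M - 1 := by omega
    have hlead : max 1 ((K : Int) - 9 * ((M : Int) - 1)) = ((1 + t : Nat) : Int) := by
      push_cast; omega
    rw [hlead]
    have hs9 : (K : Int) - ((1 + t : Nat) : Int) = ((9 * (M - 1) : Nat) : Int) := by
      push_cast; omega
    have hq2 : PySem.Int.floordiv ((K : Int) - ((1 + t : Nat) : Int)) 9 = ((M - 1 : Nat) : Int) := by
      rw [hs9]
      have h9 : PySem.Int.floordiv ((9 * (M - 1) : Nat) : Int) 9 = ((9 * (M - 1) / 9 : Nat) : Int) := by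
        exact_mod_cast PySem.Int.floordiv_natCast (9 * (M - 1)) 9
      rw [h9]
      congr 1
      omega
    have hr2 : PySem.Int.mod ((K : Int) - ((1 + t : Nat) : Int)) 9 = ((0 : Nat) : Int) := by
      rw [hs9]
      have h9 : PySem.Int.mod ((9 * (M - 1) : Nat) : Int) 9 = ((9 * (M - 1) % 9 : Nat) : Int) := by
        exact_mod_cast PySem.Int.mod_natCast (9 * (M - 1)) 9
      rw [h9]
      congr 1
      omega
    rw [hq2, hr2]
    have hne : ¬ (((0 : Nat) : Int) ≠ 0) := by simp
    rw [if_neg hne, if_neg hne]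
    apply String.toList_inj.mp
    have hz : ((M : Int) - 1 - ((M - 1 : Nat) : Int) - 0).toNat = 0 := by omega
    simp only [pvJoin_digits_toList, pvMinList, if_neg hA, List.map_cons, List.flatten_cons,
      List.map_replicate, pvFlatten_rep_singleton, pvToChars9, String.toList_append,
      pvRepeatChar_toList, hz, PySem.Int.toList_toStr, String.toList_empty, List.replicate_zero,
      Int.toNat_natCast]
    simp

-- ===== VERDICT (by name: the statement is the Claim_ definition above) =====
theorem find_min_max_numbers_spec : Claim_equal_find_min_max_numbers := by
  intro m s _ hpre
  unfold Pre_find_min_max_numbers at hpre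
  unfold Spec_find_min_max_numbers find_min_max_numbers find_min_max_numbers_alt
  by_cases hg1 : s > 9 * m
  · simp [hg1]
  · rw [if_neg hg1, if_neg hg1]
    have hpre' : 0 ≤ s := by rcases hpre with h | h <;> omega
    by_cases hg2 : s = 0
    · rw [if_pos hg2, if_pos hg2]
    · rw [if_neg hg2, if_neg hg2]
      have hs1 : 1 ≤ s := by omega
      have hm1 : 1 ≤ m := by nlinarith
      obtain ⟨M, hm⟩ : ∃ M : Nat, m = (M : Int) := ⟨m.toNat, by omega⟩
      obtain ⟨K, hs⟩ : ∃ K : Nat, s = (K : Int) := ⟨s.toNat, by omega⟩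
      subst hm; subst hs
      have hMn : 1 ≤ M := by omega
      have hKn : 1 ≤ K := by omega
      have hKM : K ≤ 9 * M := by omega
      dsimp only
      have e1 : ((K : Int) - 1).toNat = K - 1 := by omega
      have e2 : ((M : Int) - 1).toNat = M - 1 := by omega
      have e4 : ((K : Int)).toNat = K := by omega
      have e5 : ((M : Int)).toNat = M := by omega
      rw [e1, e2, e4, e5, pvMin_inv M hMn (K - 1) (by omega), pvMax_inv M hMn K hKM]
      dsimp only
      rw [Prod.mk.injEq]
      exact ⟨pvMinEq _ _ M K rfl rfl hMn hKn hKM, pvMaxEq _ _ M K rfl rfl hMn hKn hKM⟩
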